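-- pv_equiv track=rewrite | github.com/gavindsouza/awesome-frappe | .github/helper/record_sorter.py | sort_section
-- ===== SOURCE A (Python) =====
-- NEWLINE = "\n"
--
-- def sort_section(lines: list[str]) -> list[str]:
--     sorted_lines = []
--     heading_buffer = []
--
--     for line in lines:
--         is_heading = line.startswith("#")
--         is_list = line.startswith("-")
--
--         if line == NEWLINE:
--             continue
--
--         if is_heading:
--             heading_buffer.sort(key=str.casefold)
--             sorted_lines.extend(heading_buffer + [NEWLINE])
--             sorted_lines.append(line)
--             heading_buffer = [NEWLINE]
--
--         elif is_list:
--             heading_buffer.append(line)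
--
--         else:
--             if sorted_lines[-1] != NEWLINE:
--                 sorted_lines.append(NEWLINE)
--             sorted_lines.append(line)
--
--     if heading_buffer:
--         heading_buffer.sort(key=str.casefold)
--         sorted_lines.extend(heading_buffer + [NEWLINE])
--
--     return sorted_lines
-- ===== SOURCE B (Python) =====
-- NEWLINE = "\n"
--
--
-- def sort_section(lines):
--     # Pass 1: group the meaningful lines into section records
--     # (heading-or-None, inline 'other' lines, list items to be sorted).
--     records = []
--     heading, others, items = None, [], []
--     for line in lines:
--         if line == NEWLINE:
--             continue
--         if line.startswith("#"):
--             records.append((heading, others, items))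
--             heading, others, items = line, [], []
--         elif line.startswith("-"):
--             items.append(line)
--         else:
--             others.append(line)
--     records.append((heading, others, items))
--
--     # Pass 2: emit the output section by section.
--     out = []
--     pending = []
--     for heading, others, items in records:
--         if heading is not None:
--             out += sorted(pending, key=str.casefold) + [NEWLINE, heading]
--             pending = [NEWLINE]
--         for line in others:
--             out += [NEWLINE, line]
--         pending += items
--     if pending:
--         out += sorted(pending, key=str.casefold) + [NEWLINE]
--     return out
-- ===== Notes on version B (the rewrite author's own statement) =====
-- stated objective: alternative
-- what changed: A's single loop that interleaves buffering, flushing and emission is replaced by a two-pass decomposition: pass 1 groups the meaningful lines into section records (heading, inline other lines, list items), pass 2 emits each section, sorting its items with key=str.casefold.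
-- crash fix: On inputs whose first meaningful line is neither a heading nor a list item, A raises IndexError (sorted_lines[-1] on an empty list); B returns the output with a "\n" emitted before each such line. — e.g. on sort_section(["hello"]): A raises IndexError, B returns ["\n", "hello"]
import Mathlib
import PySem

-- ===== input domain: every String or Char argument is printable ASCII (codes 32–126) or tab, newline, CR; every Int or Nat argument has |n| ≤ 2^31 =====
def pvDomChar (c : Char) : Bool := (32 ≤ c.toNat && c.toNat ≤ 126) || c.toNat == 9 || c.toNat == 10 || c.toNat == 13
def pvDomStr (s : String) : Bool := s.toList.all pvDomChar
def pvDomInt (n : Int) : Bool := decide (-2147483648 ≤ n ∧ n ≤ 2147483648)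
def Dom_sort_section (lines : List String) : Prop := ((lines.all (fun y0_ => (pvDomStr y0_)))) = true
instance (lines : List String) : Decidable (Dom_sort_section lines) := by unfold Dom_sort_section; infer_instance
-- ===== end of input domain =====

-- B replaces A's single interleaved loop by a two-pass decomposition (group the lines
-- into section records, then emit each section), same output on all inputs where A returns.
-- str.casefold is ported as PySem.Str.lower (exact on the ASCII domain Dom_sort_section).

-- ===== PORT A =====
-- one loop iteration of A: state = (sorted_lines, heading_buffer)
def pvStepA (st : List String × List String) (line : String) : List String × List String :=
  let is_heading := PySem.Str.startswith line "#"
  let is_list := PySem.Str.startswith line "-"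
  if line = "\n" then st
  else if is_heading then
    (st.1 ++ (PySem.List.sorted st.2 PySem.Str.lower false ++ ["\n"]) ++ [line], ["\n"])
  else if is_list then (st.1, st.2 ++ [line])
  else
    -- sorted_lines[-1] raises IndexError when sorted_lines = [] (excluded by Pre_);
    -- here pyGet? returns none (≠ some "\n"), so the port simply prepends "\n" there.
    (if PySem.List.pyGet? st.1 (-1) ≠ some "\n" then st.1 ++ ["\n"] ++ [line]
     else st.1 ++ [line], st.2)

def sort_section (lines : List String) : List String :=
  let st := lines.foldl pvStepA ([], [])
  if st.2 ≠ [] then st.1 ++ (PySem.List.sorted st.2 PySem.Str.lower false ++ ["\n"]) else st.1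

-- ===== PORT B =====
-- a section record: (heading or none, inline 'other' lines, list items to sort)
-- pass 1: state = (current open record, completed records)
def pvStep1 (st : (Option String × List String × List String) × List (Option String × List String × List String))
    (line : String) : (Option String × List String × List String) × List (Option String × List String × List String) :=
  if line = "\n" then st
  else if PySem.Str.startswith line "#" then ((some line, [], []), st.2 ++ [st.1])
  else if PySem.Str.startswith line "-" then ((st.1.1, st.1.2.1, st.1.2.2 ++ [line]), st.2)
  else ((st.1.1, st.1.2.1 ++ [line], st.1.2.2), st.2)

def pvRecords (lines : List String) : List (Option String × List String × List String) :=
  let st := lines.foldl pvStep1 ((none, [], []), [])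
  st.2 ++ [st.1]

-- pass 2: state = (out, pending)
def pvStep2 (st : List String × List String)
    (r : Option String × List String × List String) : List String × List String :=
  let st1 : List String × List String :=
    match r.1 with
    | some hl => (st.1 ++ (PySem.List.sorted st.2 PySem.Str.lower false ++ ["\n", hl]), ["\n"])
    | none => st
  (r.2.1.foldl (fun o l => o ++ ["\n", l]) st1.1, st1.2 ++ r.2.2)

def sort_section_alt (lines : List String) : List String :=
  let st := (pvRecords lines).foldl pvStep2 ([], [])
  if st.2 ≠ [] then st.1 ++ (PySem.List.sorted st.2 PySem.Str.lower false ++ ["\n"]) else st.1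

-- ===== PRECONDITION & SPEC =====
-- Pre_ excludes exactly the inputs on which Python A raises IndexError: a meaningful
-- line that is neither a heading nor a list item occurring before the first heading.
def Pre_sort_section (lines : List String) : Prop :=
  ∀ l ∈ lines.takeWhile (fun l => !(PySem.Str.startswith l "#")),
    l = "\n" ∨ PySem.Str.startswith l "-" = true
instance (lines : List String) : Decidable (Pre_sort_section lines) := by
  unfold Pre_sort_section; infer_instance

def pvWitness_sort_section : List String := ["# Tools", "- b", "\n", "- A", "x y", "# Apps", "- c"]

-- On inputs whose first meaningful line is an 'other' line before any heading,
-- Python A raises IndexError while B returns the list with a "\n" prepended before each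
-- other line; this is made checkable by the theorem sort_section_raises at the bottom.
def Raises_sort_section (lines : List String) : Prop :=
  ∃ l ∈ lines.takeWhile (fun l => !(PySem.Str.startswith l "#")),
    ¬(l = "\n" ∨ PySem.Str.startswith l "-" = true)
instance (lines : List String) : Decidable (Raises_sort_section lines) := by
  unfold Raises_sort_section; infer_instance
def pvRaiseWitness_sort_section : List String := ["hello"]
def pvRaiseWitnessOut_sort_section : List String := ["\n", "hello"]

def Spec_sort_section (lines : List String) (out : List String) : Prop := out = sort_section_alt lines
instance (lines : List String) (out : List String) : Decidable (Spec_sort_section lines out) := by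
  unfold Spec_sort_section; infer_instance

-- ===== CLAIM (what is proved, stated in full; the proofs are below) =====
def Claim_equal_sort_section : Prop := ∀ (lines : List String), Dom_sort_section lines → Pre_sort_section lines → Spec_sort_section lines (sort_section lines)
def Claim_raises_sort_section : Prop := (∀ (lines : List String), Dom_sort_section lines → Raises_sort_section lines → ¬ Pre_sort_section lines) ∧ (Dom_sort_section (pvRaiseWitness_sort_section) ∧ Raises_sort_section (pvRaiseWitness_sort_section) ∧ sort_section_alt (pvRaiseWitness_sort_section) = pvRaiseWitnessOut_sort_section)

-- ===== LEMMAS AND PROOFS =====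

-- a well-formed record: the heading (if any) and the inline other lines are never "\n"
def pvGood (r : Option String × List String × List String) : Prop :=
  (∀ hl, r.1 = some hl → hl ≠ "\n") ∧ ∀ o ∈ r.2.1, o ≠ "\n"

-- invariant of pass 2: out never ends with "\n"
def pvPout (st : List String × List String) : Prop :=
  PySem.List.pyGet? st.1 (-1) ≠ some "\n"

-- the mid-stream pass-2 state corresponding to a pass-1 state
def pvMid (st : (Option String × List String × List String) × List (Option String × List String × List String)) :
    List String × List String :=
  pvStep2 (st.2.foldl pvStep2 ([], [])) st.1

lemma pv_startswith_ne_nl {line : String} (h : PySem.Str.startswith line "#" = true) : line ≠ "\n" := by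
  intro rfl_h; subst rfl_h; exact absurd h (by decide)

lemma pvPout_others {os : List String} (hos : ∀ o ∈ os, o ≠ "\n") :
    ∀ out : List String, PySem.List.pyGet? out (-1) ≠ some "\n" →
      PySem.List.pyGet? (os.foldl (fun o l => o ++ ["\n", l]) out) (-1) ≠ some "\n" := by
  induction os with
  | nil => intro out h; simpa using h
  | cons o os ih =>
    intro out h
    have ho : o ≠ "\n" := hos o (by simp)
    refine ih (fun x hx => hos x (by simp [hx])) _ ?_
    show PySem.List.pyGet? (out ++ ["\n", o]) (-1) ≠ some "\n"
    have : out ++ ["\n", o] = (out ++ ["\n"]) ++ [o] := by simp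
    rw [this, PySem.List.pyGet?_neg_one_append_singleton]
    simpa using ho

lemma pvPout_step2 {st : List String × List String} {r} (h : pvPout st) (hg : pvGood r) :
    pvPout (pvStep2 st r) := by
  obtain ⟨r1, r2, r3⟩ := r
  unfold pvPout pvStep2 at *
  cases r1 with
  | none => exact pvPout_others hg.2 _ h
  | some hl =>
    refine pvPout_others hg.2 _ ?_
    simp only
    have : st.1 ++ (PySem.List.sorted st.2 PySem.Str.lower false ++ ["\n", hl])
         = (st.1 ++ PySem.List.sorted st.2 PySem.Str.lower false ++ ["\n"]) ++ [hl] := by simp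
    rw [this, PySem.List.pyGet?_neg_one_append_singleton]
    simpa using hg.1 hl rfl

lemma pvPout_foldl {recs : List (Option String × List String × List String)}
    (hg : ∀ r ∈ recs, pvGood r) :
    ∀ st, pvPout st → pvPout (recs.foldl pvStep2 st) := by
  induction recs with
  | nil => intro st h; exact h
  | cons r recs ih =>
    intro st h
    exact ih (fun x hx => hg x (by simp [hx])) _ (pvPout_step2 h (hg r (by simp)))

lemma pvPout_mid {st} (hg : ∀ r ∈ st.2 ++ [st.1], pvGood r) : pvPout (pvMid st) := by
  unfold pvMid
  exact pvPout_step2 (pvPout_foldl (fun r hr => hg r (by simp [hr])) _ (by unfold pvPout; decide))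
    (hg st.1 (by simp))

-- one step of A from the mid-state equals pass 1 followed by re-reading the mid-state
lemma pv_commute {st} (hg : ∀ r ∈ st.2 ++ [st.1], pvGood r) (line : String) :
    pvStepA (pvMid st) line = pvMid (pvStep1 st line) := by
  obtain ⟨⟨h, os, its⟩, recs⟩ := st
  by_cases hnl : line = "\n"
  · simp [pvStepA, pvStep1, hnl]
  · by_cases hh : PySem.Str.startswith line "#" = true
    · simp only [pvStepA, pvStep1, pvMid, hnl, hh, if_false, if_true, List.foldl_append,
        List.foldl_cons, List.foldl_nil]
      simp [pvStep2]
    · by_cases hl : PySem.Str.startswith line "-" = true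
      · simp only [pvStepA, pvStep1, pvMid, hnl, hh, hl, if_false, if_true]
        simp [pvStep2]
      · have hpo : pvPout (pvMid ((h, os, its), recs)) := pvPout_mid hg
        simp only [pvStepA, pvStep1, pvMid, hnl, hh, hl, if_false] at *
        unfold pvPout at hpo
        simp only [hpo, if_pos, ne_eq, not_false_iff]
        simp [pvStep2, List.foldl_append]

lemma pvGood_step1 {st} (hg : ∀ r ∈ st.2 ++ [st.1], pvGood r) (line : String) :
    ∀ r ∈ (pvStep1 st line).2 ++ [(pvStep1 st line).1], pvGood r := by
  obtain ⟨⟨h, os, its⟩, recs⟩ := st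
  by_cases hnl : line = "\n"
  · simpa [pvStep1, hnl] using hg
  · by_cases hh : PySem.Str.startswith line "#" = true
    · simp only [pvStep1, hnl, hh, if_false, if_true]
      intro r hr
      simp only [List.mem_append, List.mem_singleton] at hr
      rcases hr with (hr | rfl) | rfl
      · exact hg r (by simp [hr])
      · exact hg _ (by simp)
      · exact ⟨fun hl hhl => by cases hhl; exact pv_startswith_ne_nl hh, by simp⟩
    · by_cases hl : PySem.Str.startswith line "-" = true
      · unfold pvStep1
        rw [if_neg hnl, if_neg hh, if_pos hl]
        intro r hr
        simp only [List.mem_append, List.mem_singleton] at hr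
        rcases hr with hr | rfl
        · exact hg r (by simp [hr])
        · have := hg (h, os, its) (by simp)
          exact ⟨this.1, this.2⟩
      · unfold pvStep1
        rw [if_neg hnl, if_neg hh, if_neg hl]
        intro r hr
        simp only [List.mem_append, List.mem_singleton] at hr
        rcases hr with hr | rfl
        · exact hg r (by simp [hr])
        · have hgc := hg (h, os, its) (by simp)
          refine ⟨hgc.1, ?_⟩
          intro o ho
          simp only [List.mem_append, List.mem_singleton] at ho
          rcases ho with ho | rfl
          · exact hgc.2 o ho
          · exact hnl

lemma pv_main (lines : List String) :
    ∀ st, (∀ r ∈ st.2 ++ [st.1], pvGood r) →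
      lines.foldl pvStepA (pvMid st) = pvMid (lines.foldl pvStep1 st) := by
  induction lines with
  | nil => intro st _; rfl
  | cons line lines ih =>
    intro st hg
    simp only [List.foldl_cons]
    rw [pv_commute hg line]
    exact ih _ (pvGood_step1 hg line)

-- ===== VERDICT (by name: the statement is the Claim_ definition above) =====
theorem sort_section_spec : Claim_equal_sort_section := by
  intro lines _ _
  unfold Spec_sort_section sort_section sort_section_alt pvRecords
  have h0 : pvMid ((none, [], []), []) = (([], []) : List String × List String) := by
    unfold pvMid pvStep2; rfl
  have := pv_main lines ((none, [], []), [])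
    (by intro r hr; simp at hr; subst hr; exact ⟨(fun _ h => nomatch h), by simp⟩)
  rw [h0] at this
  rw [this]
  have : pvMid (lines.foldl pvStep1 ((none, [], []), []))
      = ((lines.foldl pvStep1 ((none, [], []), [])).2
          ++ [(lines.foldl pvStep1 ((none, [], []), [])).1]).foldl pvStep2 ([], []) := by
    unfold pvMid; rw [List.foldl_append]; rfl
  rw [this]

theorem sort_section_raises : Claim_raises_sort_section := by
  unfold Claim_raises_sort_section
  refine ⟨?_, by decide, by decide, by decide⟩
  intro lines _ hr hp
  obtain ⟨l, hl, hn⟩ := hr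
  exact hn (hp l hl)

-- self-check: the raise witness indeed lies outside Pre_ (a consequence of sort_section_raises)
theorem pvRaiseWitness_outside_pre_ok : ¬ Pre_sort_section pvRaiseWitness_sort_section :=
  sort_section_raises.1 pvRaiseWitness_sort_section sort_section_raises.2.1 sort_section_raises.2.2.1
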